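-- pv_equiv track=rewrite | github.com/MikaO13/Competitions | usaco/beads.py | countBeads
-- ===== SOURCE A (Python) =====
-- def countBeads(necklace):
--     total = 0
--     color = ''
--     for beadNum in range(len(necklace)):
--         if color == '':
--             if necklace[beadNum] != 'w':
--                 color = necklace[beadNum]
--             total += 1
--         else:
--             if necklace[beadNum] == color or necklace[beadNum] == "w":
--                 total += 1
--             else:
--                 return total
--     return total
-- ===== SOURCE B (Python) =====
-- def countBeads(necklace):
--     color = next((c for c in necklace if c != 'w'), None)
--     total = 0
--     for c in necklace:
--         if c == 'w' or c == color:
--             total += 1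
--         else:
--             break
--     return total
-- ===== Notes on version B (the rewrite author's own statement) =====
-- stated objective: simpler
-- what changed: B first finds the prefix color (first non-'w' bead, None if absent) and then counts beads matching 'w' or that color, replacing A's single stateful loop that tracks an empty-string sentinel color with two branch structures.
import Mathlib
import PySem

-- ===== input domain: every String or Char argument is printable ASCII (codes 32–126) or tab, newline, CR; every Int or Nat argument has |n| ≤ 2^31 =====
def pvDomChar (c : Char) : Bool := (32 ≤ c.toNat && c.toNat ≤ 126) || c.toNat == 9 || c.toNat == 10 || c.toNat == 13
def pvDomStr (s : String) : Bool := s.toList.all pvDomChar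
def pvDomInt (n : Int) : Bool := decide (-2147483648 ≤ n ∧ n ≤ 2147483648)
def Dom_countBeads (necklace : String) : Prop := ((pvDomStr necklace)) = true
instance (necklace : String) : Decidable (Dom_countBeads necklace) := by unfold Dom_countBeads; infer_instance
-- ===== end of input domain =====

-- B finds the first non-'w' bead as the color, then counts the prefix of beads equal to 'w' or that color;
-- simpler decomposition than A's single loop with an empty-string color sentinel.

-- ===== PORT A =====
-- A's loop: state (total, color : String, color starts ''), early return on a non-matching bead.
def countBeadsGo (cs : List Char) (total : Int) (color : String) : Int :=
  match cs with
  | [] => total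
  | c :: rest =>
    if color = "" then
      countBeadsGo rest (total + 1) (if String.ofList [c] ≠ "w" then String.ofList [c] else color)
    else if String.ofList [c] = color ∨ String.ofList [c] = "w" then
      countBeadsGo rest (total + 1) color
    else total

def countBeads (necklace : String) : Int :=
  countBeadsGo necklace.toList 0 ""

-- ===== PORT B =====
def countBeadsAltGo (cs : List Char) (color : Option Char) (total : Int) : Int :=
  match cs with
  | [] => total
  | c :: rest =>
    if c = 'w' ∨ some c = color then countBeadsAltGo rest color (total + 1) else total

def countBeads_alt (necklace : String) : Int :=
  countBeadsAltGo necklace.toList (necklace.toList.find? (fun c => c != 'w')) 0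

-- ===== PRECONDITION & SPEC =====
def Spec_countBeads (necklace : String) (out : Int) : Prop := out = countBeads_alt necklace
instance (necklace : String) (out : Int) : Decidable (Spec_countBeads necklace out) := by unfold Spec_countBeads; infer_instance

-- ===== CLAIM (what is proved, stated in full; the proofs are below) =====
def Claim_equal_countBeads : Prop := ∀ (necklace : String), Dom_countBeads necklace → Spec_countBeads necklace (countBeads necklace)

-- ===== LEMMAS AND PROOFS =====

theorem single_eq_iff (c k : Char) : String.ofList [c] = String.ofList [k] ↔ c = k := by
  constructor
  · intro h
    have := congrArg String.toList h
    simp [String.toList_ofList] at this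
    exact this
  · intro h; rw [h]

theorem single_ne_empty (k : Char) : String.ofList [k] ≠ "" := by
  intro h
  have := congrArg String.length h
  simp at this

theorem phase2 (k : Char) (cs : List Char) : ∀ total : Int,
    countBeadsGo cs total (String.ofList [k]) = countBeadsAltGo cs (some k) total := by
  induction cs with
  | nil => intro total; rfl
  | cons c rest ih =>
    intro total
    have hcond : (String.ofList [c] = String.ofList [k] ∨ String.ofList [c] = "w") ↔
        (c = 'w' ∨ some c = some k) := by
      rw [show ("w" : String) = String.ofList ['w'] from rfl]
      rw [single_eq_iff, single_eq_iff, Option.some_inj]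
      exact or_comm
    show (if String.ofList [k] = "" then _ else if String.ofList [c] = String.ofList [k] ∨ String.ofList [c] = "w" then countBeadsGo rest (total + 1) (String.ofList [k]) else total) = _
    rw [if_neg (single_ne_empty k)]
    show _ = (if c = 'w' ∨ some c = some k then countBeadsAltGo rest (some k) (total + 1) else total)
    by_cases h : String.ofList [c] = String.ofList [k] ∨ String.ofList [c] = "w"
    · rw [if_pos h, if_pos (hcond.mp h), ih]
    · rw [if_neg h, if_neg (fun hb => h (hcond.mpr hb))]

theorem phase1 (cs : List Char) : ∀ total : Int,
    countBeadsGo cs total "" = countBeadsAltGo cs (cs.find? (fun c => c != 'w')) total := by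
  induction cs with
  | nil => intro total; rfl
  | cons c rest ih =>
    intro total
    show (if ("" : String) = "" then countBeadsGo rest (total + 1) (if String.ofList [c] ≠ "w" then String.ofList [c] else "") else _) = _
    rw [if_pos rfl]
    by_cases hw : c = 'w'
    · subst hw
      rw [if_neg (show ¬ (String.ofList ['w'] ≠ "w") from fun h => h rfl)]
      rw [List.find?_cons_of_neg (by decide)]
      show _ = (if 'w' = 'w' ∨ some 'w' = rest.find? (fun c => c != 'w') then countBeadsAltGo rest (rest.find? (fun c => c != 'w')) (total + 1) else total)
      rw [if_pos (Or.inl rfl)]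
      exact ih (total + 1)
    · have h1 : String.ofList [c] ≠ "w" := by
        rw [show ("w" : String) = String.ofList ['w'] from rfl, Ne, single_eq_iff]
        exact hw
      rw [if_pos h1]
      rw [List.find?_cons_of_pos (by simpa using hw)]
      show _ = (if c = 'w' ∨ some c = some c then countBeadsAltGo rest (some c) (total + 1) else total)
      rw [if_pos (Or.inr rfl)]
      exact phase2 c rest (total + 1)

-- ===== VERDICT (by name: the statement is the Claim_ definition above) =====
theorem countBeads_spec : Claim_equal_countBeads := by
  intro necklace _
  unfold Spec_countBeads countBeads countBeads_alt
  exact phase1 necklace.toList 0
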